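-- pv_equiv track=rewrite | github.com/thumbe12856/competitive-programming | hacker_cup/2022/qualification_round/A/solve.py | solve
-- ===== SOURCE A (Python) =====
-- from collections import Counter
--
-- def solve(N, K, nums):
--   cn = Counter(nums)
--   for n in cn:
--     if cn[n] > 2:
--       return "NO"
--
--   if N > K * 2:
--     return "NO"
--
--   return "YES"
-- ===== SOURCE B (Python) =====
-- def solve(N, K, nums):
--     s = sorted(nums)
--     if any(a == c for a, c in zip(s, s[2:])):
--         return "NO"
--     return "NO" if N > K * 2 else "YES"
-- ===== Notes on version B (the rewrite author's own statement) =====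
-- stated objective: alternative
-- what changed: Replaced the Counter frequency table and key loop with a sort followed by an adjacent-window scan (s[i] == s[i-2] detects any value occurring more than twice).
import Mathlib
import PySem

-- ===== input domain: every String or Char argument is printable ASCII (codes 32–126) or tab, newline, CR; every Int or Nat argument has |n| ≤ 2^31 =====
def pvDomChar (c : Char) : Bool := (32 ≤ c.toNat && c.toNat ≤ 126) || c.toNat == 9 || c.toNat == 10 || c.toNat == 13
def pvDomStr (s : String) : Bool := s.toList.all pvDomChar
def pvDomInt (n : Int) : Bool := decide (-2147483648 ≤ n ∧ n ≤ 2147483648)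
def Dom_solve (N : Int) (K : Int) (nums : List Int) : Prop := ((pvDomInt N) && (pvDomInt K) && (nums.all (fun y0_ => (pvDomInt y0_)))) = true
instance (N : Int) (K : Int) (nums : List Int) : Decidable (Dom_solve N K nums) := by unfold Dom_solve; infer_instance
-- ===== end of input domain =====

-- B replaces A's Counter frequency table with sort + adjacent-window scan; alternative decomposition (not faster).

-- ===== PORT A =====
-- the 'for n in cn: if cn[n] > 2: return "NO"' loop, with early return as Option
def solveLoopA (cn : PySem.Dict Int Int) : List Int → Option String
  | [] => none
  | k :: rest => if cn.getD k 0 > 2 then some "NO" else solveLoopA cn rest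

def solve (N : Int) (K : Int) (nums : List Int) : String :=
  let cn := PySem.Dict.counter nums
  match solveLoopA cn cn.keys with
  | some r => r
  | none => if N > K * 2 then "NO" else "YES"

-- ===== PORT B =====
def solve_alt (N : Int) (K : Int) (nums : List Int) : String :=
  let s := PySem.List.sorted nums (fun x => x) false
  -- any(a == c for a, c in zip(s, s[2:]))
  if (s.zip (PySem.List.slice s (some 2) none)).any (fun p => p.1 == p.2) then "NO"
  else if N > K * 2 then "NO" else "YES"

-- ===== PRECONDITION & SPEC =====
def Spec_solve (N : Int) (K : Int) (nums : List Int) (out : String) : Prop := out = solve_alt N K nums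
instance (N : Int) (K : Int) (nums : List Int) (out : String) : Decidable (Spec_solve N K nums out) := by unfold Spec_solve; infer_instance

-- ===== CLAIM (what is proved, stated in full; the proofs are below) =====
def Claim_equal_solve : Prop := ∀ (N : Int) (K : Int) (nums : List Int), Dom_solve N K nums → Spec_solve N K nums (solve N K nums)

-- ===== LEMMAS AND PROOFS =====

theorem solveLoopA_eq (cn : PySem.Dict Int Int) (l : List Int) :
    solveLoopA cn l = if l.any (fun k => cn.getD k 0 > 2) then some "NO" else none := by
  induction l with
  | nil => simp [solveLoopA]
  | cons k rest ih =>
    simp only [solveLoopA, List.any_cons, ih]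
    by_cases h : cn.getD k 0 > 2 <;> simp [h]

-- on a ≤-sorted list, the i/i-2 window test detects exactly 'some value occurs ≥ 3 times'
theorem trip_iff (s : List Int) (hs : s.Pairwise (· ≤ ·)) :
    ((s.zip (s.drop 2)).any (fun p => p.1 == p.2) = true) ↔ ∃ x : Int, 3 ≤ s.count x := by
  induction s with
  | nil => simp
  | cons a t ih =>
    match t, hs with
    | [], _ =>
      constructor
      · intro h; simp at h
      · rintro ⟨x, hx⟩
        have : List.count x [a] ≤ 1 := by
          have := List.count_le_length (l := [a]) (a := x); simpa using this
        omega
    | [b], _ =>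
      constructor
      · intro h; simp at h
      · rintro ⟨x, hx⟩
        have : List.count x [a, b] ≤ 2 := by
          have := List.count_le_length (l := [a, b]) (a := x); simpa using this
        omega
    | b :: c :: t, hs =>
      have hab : a ≤ b := (List.pairwise_cons.mp hs).1 b (by simp)
      have hac : a ≤ c := (List.pairwise_cons.mp hs).1 c (by simp)
      have htail : (b :: c :: t).Pairwise (· ≤ ·) := (List.pairwise_cons.mp hs).2
      have hbc : b ≤ c := (List.pairwise_cons.mp htail).1 c (by simp)
      have hct : ∀ y ∈ t, c ≤ y := (List.pairwise_cons.mp (List.pairwise_cons.mp htail).2).1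
      have ihh := ih htail
      constructor
      · intro h
        simp only [List.drop, List.zip_cons_cons, List.any_cons, Bool.or_eq_true, beq_iff_eq] at h
        rcases h with h | h
        · refine ⟨a, ?_⟩
          have hb : b = a := le_antisymm (by omega) hab
          simp [h.symm, hb]
        · obtain ⟨x, hx⟩ := ihh.mp (by simpa using h)
          exact ⟨x, le_trans hx (List.count_le_count_cons ..)⟩
      · rintro ⟨x, hx⟩
        simp only [List.drop, List.zip_cons_cons, List.any_cons, Bool.or_eq_true, beq_iff_eq]
        by_cases hxa : a = c
        · exact Or.inl hxa
        · have hlt : a < c := lt_of_le_of_ne hac hxa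
          right
          have hcount : 3 ≤ List.count x (b :: c :: t) := ?_
          · simpa using ihh.mpr ⟨x, hcount⟩
          by_cases hxe : x = a
          · exfalso
            subst hxe
            have h1 : List.count x (c :: t) = 0 := by
              rw [List.count_eq_zero]
              intro hmem
              rcases List.mem_cons.mp hmem with h | h
              · omega
              · have := hct x h; omega
            have h2 : List.count x [b] ≤ 1 := by
              have := List.count_le_length (l := [b]) (a := x); simpa using this
            have h3 : List.count x (x :: b :: c :: t) =
                1 + List.count x [b] + List.count x (c :: t) := by
              simp [List.count_cons]; omega
            omega
          · have : List.count x (a :: b :: c :: t) = List.count x (b :: c :: t) := by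
              simp [List.count_cons]
              omega
            omega

theorem zip_slice_eq (s : List Int) :
    PySem.List.slice s (some 2) none = s.drop 2 := by
  simpa using PySem.List.slice_from_natCast (xs := s) (a := 2)

-- ===== VERDICT (by name: the statement is the Claim_ definition above) =====
theorem solve_spec : Claim_equal_solve := by
  intro N K nums _
  show solve N K nums = solve_alt N K nums
  simp only [solve, solve_alt, solveLoopA_eq, zip_slice_eq]
  set s := PySem.List.sorted nums (fun x => x) false with hsdef
  have hperm : s.Perm nums := PySem.List.sorted_perm nums (fun x => x) false
  have hpair : s.Pairwise (· ≤ ·) := by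
    simpa using PySem.List.sorted_pairwise (xs := nums) (key := fun x => x)
  have hA : ((PySem.Dict.counter nums).keys.any
      (fun k => (PySem.Dict.counter nums).getD k 0 > 2) = true) ↔
      ((s.zip (s.drop 2)).any (fun p => p.1 == p.2) = true) := by
    rw [trip_iff s hpair]
    simp only [PySem.Dict.keys_counter, List.any_eq_true, PySem.Dict.getD_counter]
    constructor
    · rintro ⟨k, hk, hgt⟩
      refine ⟨k, ?_⟩
      rw [hperm.count_eq]
      simp at hgt; omega
    · rintro ⟨x, hx⟩
      rw [hperm.count_eq] at hx
      refine ⟨x, ?_, by simp; omega⟩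
      rw [PySem.Set.mem_ofList]
      exact List.count_pos_iff.mp (by omega)
  by_cases h : (s.zip (s.drop 2)).any (fun p => p.1 == p.2) = true
  · rw [if_pos (hA.mpr h), if_pos h]
  · rw [if_neg (fun hh => h (hA.mp hh)), if_neg h]
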